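-- pv_equiv track=rewrite | github.com/JoseOso13/Musk-mod-0 | Modulo 3/Ejercicios modulo 3.py | __asistencia
-- ===== SOURCE A (Python) =====
-- def __asistencia(asistencias):
--     for asistencia in asistencias.values():
--         if asistencia < 4:
--             return 1
--     for asistencia in asistencias.values():
--         if 4 <= asistencia <=8:
--             return 2
--     return 3
-- ===== SOURCE B (Python) =====
-- def __asistencia(asistencias):
--     m = min(asistencias.values(), default=9)
--     return 1 if m < 4 else (2 if m <= 8 else 3)
-- ===== Notes on version B (the rewrite author's own statement) =====
-- stated objective: simpler
-- what changed: Replaces A's two priority scans over the values with a single min aggregate followed by a closed-form threshold cascade (empty dict handled by default=9, giving 3 as A does).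
import Mathlib
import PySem

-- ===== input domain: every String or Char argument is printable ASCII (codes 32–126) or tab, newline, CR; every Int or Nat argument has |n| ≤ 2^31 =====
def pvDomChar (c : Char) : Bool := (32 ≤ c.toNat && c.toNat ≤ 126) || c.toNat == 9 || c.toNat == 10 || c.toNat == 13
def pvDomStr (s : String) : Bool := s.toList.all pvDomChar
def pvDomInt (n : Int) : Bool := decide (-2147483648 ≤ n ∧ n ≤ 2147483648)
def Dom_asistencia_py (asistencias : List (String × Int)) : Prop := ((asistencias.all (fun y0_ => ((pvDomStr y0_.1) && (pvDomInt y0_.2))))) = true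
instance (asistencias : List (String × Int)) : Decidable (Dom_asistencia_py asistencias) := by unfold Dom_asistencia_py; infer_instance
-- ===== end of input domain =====

-- B replaces A's two priority scans of the values with a single min aggregate
-- and a closed-form threshold cascade (objective: simpler).


-- ===== PORT A =====
-- first loop: 'for asistencia in asistencias.values(): if asistencia < 4: return 1'
def aLoop1 : List Int → Option Int
  | [] => none
  | v :: rest => if v < 4 then some 1 else aLoop1 rest

-- second loop: 'for asistencia in asistencias.values(): if 4 <= asistencia <= 8: return 2'
def aLoop2 : List Int → Option Int
  | [] => none
  | v :: rest => if 4 ≤ v ∧ v ≤ 8 then some 2 else aLoop2 rest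

def asistencia_py (asistencias : List (String × Int)) : Int :=
  let vals := (PySem.Dict.ofList asistencias).values
  match aLoop1 vals with
  | some r => r
  | none =>
    match aLoop2 vals with
    | some r => r
    | none => 3

-- ===== PORT B =====
def asistencia_py_alt (asistencias : List (String × Int)) : Int :=
  let m := (PySem.List.min? (PySem.Dict.ofList asistencias).values (fun y => y)).getD 9
  if m < 4 then 1 else if m ≤ 8 then 2 else 3

-- ===== PRECONDITION & SPEC =====
def Spec_asistencia_py (asistencias : List (String × Int)) (out : Int) : Prop := out = asistencia_py_alt asistencias
instance (asistencias : List (String × Int)) (out : Int) : Decidable (Spec_asistencia_py asistencias out) := by unfold Spec_asistencia_py; infer_instance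

-- ===== CLAIM (what is proved, stated in full; the proofs are below) =====
def Claim_equal_asistencia_py : Prop := ∀ (asistencias : List (String × Int)), Dom_asistencia_py asistencias → Spec_asistencia_py asistencias (asistencia_py asistencias)

-- ===== LEMMAS AND PROOFS =====
theorem aLoop1_none_iff (vs : List Int) : aLoop1 vs = none ↔ ∀ v ∈ vs, ¬ v < 4 := by
  induction vs with
  | nil => simp [aLoop1]
  | cons v rest ih =>
    simp only [aLoop1]
    split_ifs with h <;> simp_all

theorem aLoop1_some (vs : List Int) (h : ∃ v ∈ vs, v < 4) : aLoop1 vs = some 1 := by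
  induction vs with
  | nil => simp at h
  | cons v rest ih =>
    simp only [aLoop1]
    split_ifs with hv
    · rfl
    · rcases h with ⟨w, hw, hlt⟩
      rcases List.mem_cons.mp hw with rfl | hw'
      · exact absurd hlt hv
      · exact ih ⟨w, hw', hlt⟩

theorem aLoop2_none_iff (vs : List Int) : aLoop2 vs = none ↔ ∀ v ∈ vs, ¬ (4 ≤ v ∧ v ≤ 8) := by
  induction vs with
  | nil => simp [aLoop2]
  | cons v rest ih =>
    simp only [aLoop2]
    split_ifs with h <;> simp_all

theorem aLoop2_some (vs : List Int) (h : ∃ v ∈ vs, 4 ≤ v ∧ v ≤ 8) : aLoop2 vs = some 2 := by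
  induction vs with
  | nil => simp at h
  | cons v rest ih =>
    simp only [aLoop2]
    split_ifs with hv
    · rfl
    · rcases h with ⟨w, hw, hr⟩
      rcases List.mem_cons.mp hw with rfl | hw'
      · exact absurd hr hv
      · exact ih ⟨w, hw', hr⟩

-- core equivalence on an arbitrary values list
theorem core (vs : List Int) :
    (match aLoop1 vs with
     | some r => r
     | none => match aLoop2 vs with | some r => r | none => (3 : Int)) =
    (let m := (PySem.List.min? vs (fun y => y)).getD 9
     if m < 4 then (1 : Int) else if m ≤ 8 then 2 else 3) := by
  cases hmin : PySem.List.min? vs (fun y => y) with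
  | none =>
    have hvs : vs = [] := (PySem.List.min?_eq_none_iff _ _).mp hmin
    subst hvs
    simp [aLoop1, aLoop2]
  | some m =>
    have hmem : m ∈ vs := PySem.List.min?_mem hmin
    have hmin' : ∀ y ∈ vs, m ≤ y := by
      intro y hy; exact PySem.List.min?_isMin hmin y hy
    by_cases h4 : m < 4
    · rw [aLoop1_some vs ⟨m, hmem, h4⟩]
      simp [h4]
    · have h1 : aLoop1 vs = none := (aLoop1_none_iff vs).mpr (by
        intro v hv hlt; exact h4 (lt_of_le_of_lt (hmin' v hv) hlt))
      by_cases h8 : m ≤ 8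
      · rw [h1, aLoop2_some vs ⟨m, hmem, le_of_not_gt h4, h8⟩]
        simp [h4, h8]
      · have h2 : aLoop2 vs = none := (aLoop2_none_iff vs).mpr (by
          intro v hv ⟨_, hle⟩; exact h8 (le_trans (hmin' v hv) hle))
        rw [h1, h2]
        simp [h4, h8]

-- ===== VERDICT (by name: the statement is the Claim_ definition above) =====
theorem asistencia_py_spec : Claim_equal_asistencia_py := by
  intro asistencias _
  unfold Spec_asistencia_py asistencia_py asistencia_py_alt
  exact core _
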